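-- pv_equiv track=rewrite | github.com/10639780/proti | algorithms/firefly.py | direction_to_xy
-- ===== SOURCE A (Python) =====
-- def direction_to_xy(nodes_visited):
--     """Converts a series of string with directions like ['left', 'right'] to lists with xy positions."""
--
--     pos_x = [0,1]
--     pos_y = [0,0]
--
--     # go over every node
--     for i, n in enumerate(nodes_visited):
--
--         # previous direction is determined
--         delta_x = pos_x[-1] - pos_x[-2]
--         delta_y = pos_y[-1] - pos_y[-2]
--
--         # rotation matrices used to turn into the desired direction
--         if n == 0: #straight
--             pos_x.append(pos_x[-1] + delta_x)
--             pos_y.append(pos_y[-1] + delta_y)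
--         elif n == 1: # left
--             pos_x.append(pos_x[-1] - delta_y)
--             pos_y.append(pos_y[-1] + delta_x)
--         elif n == 2: # right
--             pos_x.append(pos_x[-1] + delta_y )
--             pos_y.append(pos_y[-1] - delta_x)
--
--     return pos_x, pos_y
-- ===== SOURCE B (Python) =====
-- def direction_to_xy(nodes_visited):
--     """Converts a series of string with directions like ['left', 'right'] to lists with xy positions."""
--     # Maintain the heading as a direction index d (0=E,1=N,2=W,3=S) into a unit-vector
--     # table and the current position as running integers, instead of reconstructing
--     # the delta from the last two list entries each iteration.
--     DX = (1, 0, -1, 0)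
--     DY = (0, 1, 0, -1)
--     d = 0
--     x, y = 1, 0
--     pos_x = [0, 1]
--     pos_y = [0, 0]
--     for n in nodes_visited:
--         if n == 1:      # left: quarter turn counter-clockwise
--             d = (d + 1) % 4
--         elif n == 2:    # right: quarter turn clockwise
--             d = (d + 3) % 4
--         elif n != 0:    # unknown direction: no step
--             continue
--         x += DX[d]
--         y += DY[d]
--         pos_x.append(x)
--         pos_y.append(y)
--     return pos_x, pos_y
-- ===== Notes on version B (the rewrite author's own statement) =====
-- stated objective: simpler
-- what changed: B keeps the heading as a direction index 0..3 into a fixed unit-vector table (updated by +1/+3 mod 4) and the position as running integers, instead of re-deriving the delta from the last two list entries by negative indexing and applying rotation-matrix arithmetic each iteration.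
import Mathlib
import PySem

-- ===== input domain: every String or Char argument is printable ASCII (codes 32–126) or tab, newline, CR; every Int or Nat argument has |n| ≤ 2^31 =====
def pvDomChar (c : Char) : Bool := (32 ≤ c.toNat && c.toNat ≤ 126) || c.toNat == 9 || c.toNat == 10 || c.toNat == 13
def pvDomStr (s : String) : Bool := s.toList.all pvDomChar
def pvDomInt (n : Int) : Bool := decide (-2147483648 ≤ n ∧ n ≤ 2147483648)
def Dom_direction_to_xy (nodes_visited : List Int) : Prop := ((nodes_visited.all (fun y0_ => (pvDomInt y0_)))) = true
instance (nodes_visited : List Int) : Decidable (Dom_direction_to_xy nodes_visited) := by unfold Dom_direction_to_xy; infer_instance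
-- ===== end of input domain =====

-- B replaces A's delta-from-last-two-list-entries rotation arithmetic by a heading index
-- 0..3 into a fixed unit-vector table plus a running position (simpler state, same O(n)).

-- ===== PORT A =====
-- One loop iteration of A: reads the last two entries of each list (always present,
-- since both lists start with two elements and only grow, so the `.getD 0` defaults
-- are unreachable), then appends by the rotation cases.
def stepA (s : List Int × List Int) (_n : Int) : List Int × List Int :=
  let px := s.1
  let py := s.2
  let dx := (PySem.List.pyGet? px (-1)).getD 0 - (PySem.List.pyGet? px (-2)).getD 0
  let dy := (PySem.List.pyGet? py (-1)).getD 0 - (PySem.List.pyGet? py (-2)).getD 0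
  if _n = 0 then
    (px ++ [(PySem.List.pyGet? px (-1)).getD 0 + dx], py ++ [(PySem.List.pyGet? py (-1)).getD 0 + dy])
  else if _n = 1 then
    (px ++ [(PySem.List.pyGet? px (-1)).getD 0 - dy], py ++ [(PySem.List.pyGet? py (-1)).getD 0 + dx])
  else if _n = 2 then
    (px ++ [(PySem.List.pyGet? px (-1)).getD 0 + dy], py ++ [(PySem.List.pyGet? py (-1)).getD 0 - dx])
  else (px, py)

def direction_to_xy (nodes_visited : List Int) : List Int × List Int :=
  nodes_visited.foldl stepA ([0, 1], [0, 0])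

-- ===== PORT B =====
-- The unit-vector tables DX/DY; the heading index is always 0..3, so `.getD 0` is unreachable.
def dxTab : List Int := [1, 0, -1, 0]
def dyTab : List Int := [0, 1, 0, -1]

-- One loop iteration of B over state ((pos_x, pos_y), (x, y, d)).
def stepB (s : (List Int × List Int) × (Int × Int × Int)) (n : Int) : (List Int × List Int) × (Int × Int × Int) :=
  let xs := s.1.1
  let ys := s.1.2
  let x := s.2.1
  let y := s.2.2.1
  let d := s.2.2.2
  if n ≠ 0 ∧ n ≠ 1 ∧ n ≠ 2 then s   -- unknown direction: `continue`
  else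
    let d' := if n = 1 then PySem.Int.mod (d + 1) 4
              else if n = 2 then PySem.Int.mod (d + 3) 4
              else d
    let x' := x + (PySem.List.pyGet? dxTab d').getD 0
    let y' := y + (PySem.List.pyGet? dyTab d').getD 0
    ((xs ++ [x'], ys ++ [y']), (x', y', d'))

def direction_to_xy_alt (nodes_visited : List Int) : List Int × List Int :=
  (nodes_visited.foldl stepB (([0, 1], [0, 0]), (1, 0, 0))).1

-- ===== PRECONDITION & SPEC =====
def Spec_direction_to_xy (nodes_visited : List Int) (out : List Int × List Int) : Prop := out = direction_to_xy_alt nodes_visited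
instance (nodes_visited : List Int) (out : List Int × List Int) : Decidable (Spec_direction_to_xy nodes_visited out) := by unfold Spec_direction_to_xy; infer_instance

-- ===== CLAIM (what is proved, stated in full; the proofs are below) =====
def Claim_equal_direction_to_xy : Prop := ∀ (nodes_visited : List Int), Dom_direction_to_xy nodes_visited → Spec_direction_to_xy nodes_visited (direction_to_xy nodes_visited)

-- ===== LEMMAS AND PROOFS =====

-- Invariant tying A's list-only state to B's (lists, position, heading) state:
-- each list ends in [second-last, last], the running position is the last entry,
-- and the difference of the last two entries is the table vector of the heading.
def PathInv (px py : List Int) (x y d : Int) : Prop :=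
  0 ≤ d ∧ d < 4 ∧
  (∃ p a, px = p ++ [a, x] ∧ x - a = (PySem.List.pyGet? dxTab d).getD 0) ∧
  (∃ q c, py = q ++ [c, y] ∧ y - c = (PySem.List.pyGet? dyTab d).getD 0)

-- One iteration: the A-step and B-step produce the same lists, and the invariant persists.
lemma step_agree (px py : List Int) (x y d n : Int) (h : PathInv px py x y d) :
    stepA (px, py) n = (stepB ((px, py), (x, y, d)) n).1 ∧
    PathInv (stepB ((px, py), (x, y, d)) n).1.1 (stepB ((px, py), (x, y, d)) n).1.2
        (stepB ((px, py), (x, y, d)) n).2.1 (stepB ((px, py), (x, y, d)) n).2.2.1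
        (stepB ((px, py), (x, y, d)) n).2.2.2 := by
  obtain ⟨hd0, hd4, ⟨p, a, hpx, hdx⟩, ⟨q, c, hpy, hdy⟩⟩ := h
  have hd : d = 0 ∨ d = 1 ∨ d = 2 ∨ d = 3 := by omega
  by_cases h0 : n = 0
  all_goals try subst h0
  all_goals try (by_cases h1 : n = 1)
  all_goals try subst h1
  all_goals try (by_cases h2 : n = 2)
  all_goals try subst h2
  case neg =>
    -- unknown direction: both steps leave the state unchanged
    simp only [stepB, h0, h1, h2, ne_eq, not_false_iff, and_self, if_true]
    refine ⟨?_, hd0, hd4, ⟨p, a, hpx, hdx⟩, ⟨q, c, hpy, hdy⟩⟩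
    simp [stepA, h0, h1, h2]
  all_goals
    simp only [dxTab, dyTab, PySem.List.pyGet?, PySem.List.pyIdx?] at hdx hdy
    rcases hd with h | h | h | h <;> subst h <;> norm_num [Int.toNat] at hdx hdy <;>
    constructor
  all_goals try (refine ⟨?_, ?_, ⟨p ++ [a], x, ?_, ?_⟩, ⟨q ++ [c], y, ?_, ?_⟩⟩ <;>
       simp [stepB, hpx, hpy, dxTab, dyTab, PySem.List.pyGet?, PySem.List.pyIdx?,
             PySem.Int.mod]; try omega)
  all_goals (simp [stepA, stepB, hpx, hpy, dxTab, dyTab,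
           PySem.List.pyGet?, PySem.List.pyIdx?, PySem.Int.mod]; try omega)

-- The whole loop: folding A's step over list-state equals the list part of folding B's step,
-- for any pair of states related by the invariant.
lemma fold_agree (l : List Int) : ∀ (px py : List Int) (x y d : Int), PathInv px py x y d →
    l.foldl stepA (px, py) = (l.foldl stepB ((px, py), (x, y, d))).1 := by
  induction l with
  | nil => intro px py x y d _; rfl
  | cons n t ih =>
    intro px py x y d h
    obtain ⟨heq, hinv⟩ := step_agree px py x y d n h
    simp only [List.foldl_cons, heq]
    exact ih _ _ _ _ _ hinv

-- ===== VERDICT (by name: the statement is the Claim_ definition above) =====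
theorem direction_to_xy_spec : Claim_equal_direction_to_xy := by
  intro l _
  show direction_to_xy l = direction_to_xy_alt l
  exact fold_agree l [0, 1] [0, 0] 1 0 0 ⟨by norm_num, by norm_num, ⟨[], 0, rfl, by decide⟩, ⟨[], 0, rfl, by decide⟩⟩
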